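-- pv_equiv track=rewrite | github.com/miliar/Code_Jam_Webscraper | solutions_python/Problem_181/819.py | trees
-- ===== SOURCE A (Python) =====
-- def trees(items, index, stri):
-- 	if index > len(items) - 1:
-- 		return stri
-- 	else:
-- 		s1 = trees(items, index+1, stri + items[index])
-- 		s2 = trees(items, index+1, items[index] + stri)
-- 		if s1 > s2:
-- 			return s1
-- 		else:
-- 			return s2
-- ===== SOURCE B (Python) =====
-- def trees(items, index, stri):
--     # Greedy single pass: keep the lexicographically larger of append/prepend
--     # at each item; equals the max over all choice sequences.
--     for i in range(index, len(items)):
--         item = items[i]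
--         s1 = stri + item
--         s2 = item + stri
--         stri = s1 if s1 > s2 else s2
--     return stri
-- ===== Notes on version B (the rewrite author's own statement) =====
-- stated objective: alternative
-- what changed: Replaces the branching recursion (try both prepend and append for every item and take the max of all 2^n outcomes) with a single greedy left-to-right pass keeping the larger of stri+item and item+stri; a monotonicity argument for equal-length strings shows the greedy choice is globally optimal.
import Mathlib
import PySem

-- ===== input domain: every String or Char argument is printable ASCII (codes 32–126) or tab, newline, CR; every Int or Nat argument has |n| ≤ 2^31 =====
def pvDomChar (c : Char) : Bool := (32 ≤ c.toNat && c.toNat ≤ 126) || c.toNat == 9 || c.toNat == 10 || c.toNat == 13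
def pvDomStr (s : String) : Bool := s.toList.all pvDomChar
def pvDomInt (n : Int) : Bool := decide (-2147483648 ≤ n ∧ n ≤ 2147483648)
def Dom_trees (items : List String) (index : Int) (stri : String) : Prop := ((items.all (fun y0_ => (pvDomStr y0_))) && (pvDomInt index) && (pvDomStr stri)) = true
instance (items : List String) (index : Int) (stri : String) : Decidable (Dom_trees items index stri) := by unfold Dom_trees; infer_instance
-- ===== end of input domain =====

-- B replaces A's try-both-ways branching recursion with a single greedy left-to-right pass; equal return values are proved below.


-- ===== PORT A =====
-- strings are handled as List Char (PySem convention); Python's `s1 > s2` is `s2 < s1` in the lexicographic order on List Char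
def treesL (items : List (List Char)) (index : Int) (s : List Char) : List Char :=
  if index > (items.length : Int) - 1 then s
  else
    let s1 := treesL items (index + 1) (s ++ PySem.List.pyGetD items index [])
    let s2 := treesL items (index + 1) (PySem.List.pyGetD items index [] ++ s)
    if s2 < s1 then s1 else s2
termination_by ((items.length : Int) - index).toNat
decreasing_by all_goals omega

def trees (items : List String) (index : Int) (stri : String) : String :=
  String.ofList (treesL (items.map String.toList) index stri.toList)

-- ===== PORT B =====
def trees_alt (items : List String) (index : Int) (stri : String) : String :=
  String.ofList ((PySem.List.pyRange index ((items.map String.toList).length : Int) 1).foldl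
    (fun s i =>
      let item := PySem.List.pyGetD (items.map String.toList) i []
      let s1 := s ++ item
      let s2 := item ++ s
      if s2 < s1 then s1 else s2) stri.toList)

-- ===== PRECONDITION & SPEC =====
-- Pre_ excludes exactly the inputs where Python's items[index] raises IndexError (index below -len(items)).
def Pre_trees (items : List String) (index : Int) (stri : String) : Prop :=
  -(items.length : Int) ≤ index
instance (items : List String) (index : Int) (stri : String) : Decidable (Pre_trees items index stri) := by unfold Pre_trees; infer_instance

def pvWitness_trees : List String × Int × String := (["ba", "a", "z"], 0, "b")

def Spec_trees (items : List String) (index : Int) (stri : String) (out : String) : Prop := out = trees_alt items index stri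
instance (items : List String) (index : Int) (stri : String) (out : String) : Decidable (Spec_trees items index stri out) := by unfold Spec_trees; infer_instance

-- ===== CLAIM (what is proved, stated in full; the proofs are below) =====
def Claim_equal_trees : Prop := ∀ (items : List String) (index : Int) (stri : String), Dom_trees items index stri → Pre_trees items index stri → Spec_trees items index stri (trees items index stri)

-- ===== LEMMAS AND PROOFS =====

-- the sequence of items A and B actually visit (with Python's negative-index wraparound)
def visited (L : List (List Char)) (index : Int) : List (List Char) :=
  (PySem.List.pyRange index (L.length : Int) 1).map (fun i => PySem.List.pyGetD L i [])

-- A's value, structurally over the visited list: max over both placements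
def bestT : List (List Char) → List Char → List Char
  | [], s => s
  | x :: l, s => max (bestT l (s ++ x)) (bestT l (x ++ s))

-- B's value, structurally: greedy fold
def bestG : List (List Char) → List Char → List Char
  | [], s => s
  | x :: l, s => bestG l (max (s ++ x) (x ++ s))

lemma if_lt_eq_max (a b : List Char) : (if b < a then a else b) = max a b := by
  rcases lt_or_ge b a with h | h
  · rw [max_eq_left h.le, if_pos h]
  · rw [max_eq_right h, if_neg (not_lt.2 h)]

-- lexicographic facts for equal-length strings
lemma lex_append_right {a b : List Char} (c : List Char)
    (h : a < b) (hl : a.length = b.length) : a ++ c < b ++ c := by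
  induction a generalizing b with
  | nil =>
    cases b with
    | nil => exact absurd h (lt_irrefl _)
    | cons y ys => simp at hl
  | cons x xs ih =>
    cases b with
    | nil => simp at hl
    | cons y ys =>
      rcases (List.cons_lt_cons_iff).1 h with hx | ⟨hx, ht⟩
      · exact (List.cons_lt_cons_iff).2 (Or.inl hx)
      · subst hx
        simp only [List.length_cons, Nat.add_right_cancel_iff] at hl
        exact (List.cons_lt_cons_iff).2 (Or.inr ⟨rfl, ih ht hl⟩)

lemma lex_append_left {a b : List Char} (c : List Char) (h : a ≤ b) : c ++ a ≤ c ++ b := by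
  induction c with
  | nil => simpa using h
  | cons x xs ih => simpa using (List.cons_le_cons x ih)

lemma lex_append_right_le {a b : List Char} (c : List Char)
    (h : a ≤ b) (hl : a.length = b.length) : a ++ c ≤ b ++ c := by
  rcases h.lt_or_eq with h' | h'
  · exact (lex_append_right c h' hl).le
  · subst h'; exact le_rfl

lemma bestG_mono (l : List (List Char)) : ∀ {a b : List Char},
    a ≤ b → a.length = b.length → bestG l a ≤ bestG l b := by
  induction l with
  | nil => intro a b h _; simpa [bestG] using h
  | cons x t ih =>
    intro a b h hl
    have h1 : a ++ x ≤ b ++ x := lex_append_right_le x h hl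
    have h2 : x ++ a ≤ x ++ b := lex_append_left x h
    have hm : max (a ++ x) (x ++ a) ≤ max (b ++ x) (x ++ b) := max_le_max h1 h2
    have hml : (max (a ++ x) (x ++ a)).length = (max (b ++ x) (x ++ b)).length := by
      rcases max_choice (a ++ x) (x ++ a) with ha | ha <;>
        rcases max_choice (b ++ x) (x ++ b) with hb | hb <;>
          rw [ha, hb] <;> simp <;> omega
    rw [bestG, bestG]
    exact ih hm hml

lemma bestT_eq_bestG (l : List (List Char)) : ∀ s : List Char, bestT l s = bestG l s := by
  induction l with
  | nil => intro s; rfl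
  | cons x t ih =>
    intro s
    rw [bestT, bestG, ih, ih]
    rcases le_total (s ++ x) (x ++ s) with h | h
    · have hg : bestG t (s ++ x) ≤ bestG t (x ++ s) :=
        bestG_mono t h (by simp; omega)
      rw [max_eq_right h, max_eq_right hg]
    · have hg : bestG t (x ++ s) ≤ bestG t (s ++ x) :=
        bestG_mono t h (by simp; omega)
      rw [max_eq_left h, max_eq_left hg]

lemma pyRange_one_nil {a b : Int} (h : b ≤ a) : PySem.List.pyRange a b 1 = [] := by
  unfold PySem.List.pyRange
  simp
  omega

lemma treesL_eq_bestT (L : List (List Char)) : ∀ (n : Nat) (index : Int) (s : List Char),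
    ((L.length : Int) - index).toNat = n → -(L.length : Int) ≤ index →
    treesL L index s = bestT (visited L index) s := by
  intro n
  induction n with
  | zero =>
    intro index s hn hpre
    have hge : (L.length : Int) - 1 < index := by omega
    rw [treesL, if_pos hge]
    rw [visited, pyRange_one_nil (by omega)]
    rfl
  | succ k ih =>
    intro index s hn hpre
    have hlt : ¬ index > (L.length : Int) - 1 := by omega
    rw [treesL, if_neg hlt]
    have hcons : PySem.List.pyRange index (L.length : Int) 1 =
        index :: PySem.List.pyRange (index + 1) (L.length : Int) 1 :=
      PySem.List.pyRange_one_cons (by omega)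
    rw [visited, hcons, List.map_cons]
    rw [bestT]
    have h1 := ih (index + 1) (s ++ PySem.List.pyGetD L index []) (by omega) (by omega)
    have h2 := ih (index + 1) (PySem.List.pyGetD L index [] ++ s) (by omega) (by omega)
    rw [h1, h2, if_lt_eq_max, visited]

lemma foldl_eq_bestG (L : List (List Char)) (index : Int) (s : List Char) :
    (PySem.List.pyRange index (L.length : Int) 1).foldl
      (fun s i =>
        let item := PySem.List.pyGetD L i []
        let s1 := s ++ item
        let s2 := item ++ s
        if s2 < s1 then s1 else s2) s = bestG (visited L index) s := by
  rw [visited]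
  generalize PySem.List.pyRange index (L.length : Int) 1 = r
  induction r generalizing s with
  | nil => rfl
  | cons i t ih =>
    simp only [List.foldl_cons, List.map_cons, bestG]
    rw [ih, if_lt_eq_max]

-- ===== VERDICT (by name: the statement is the Claim_ definition above) =====
theorem trees_spec : Claim_equal_trees := by
  intro items index stri _ hpre
  unfold Spec_trees trees trees_alt
  have hlen : ((items.map String.toList).length : Int) = (items.length : Int) := by simp
  rw [foldl_eq_bestG]
  rw [treesL_eq_bestT (items.map String.toList)
        (((items.map String.toList).length : Int) - index).toNat index stri.toList rfl
        (by rw [hlen]; exact hpre)]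
  rw [bestT_eq_bestG]
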